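-- pv_equiv track=rewrite | github.com/TablewareBox/evals | evals/elsuite/rag_table_extract.py | fuzzy_normalize
-- ===== SOURCE A (Python) =====
-- def fuzzy_normalize(s):
--     if s.startswith("Unnamed"):
--         return ""
--     else:
--         """ 标准化字符串 """
--         # 定义需要移除的单位和符号
--         units = ["µM", "µg/mL", "nM"]
--         for unit in units:
--             s = s.replace(unit, "")
--
--         # 定义特定关键字
--         keywords = ["pIC50", "IC50", "EC50", "TC50", "GI50", "Ki", "Kd", "Kb", "pKb"]
--
--         # 移除非字母数字的字符，除了空格
--         # s = re.sub(r'[^\w\s]', '', s)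
--
--         # 分割字符串为单词列表
--         words = s.split()
--
--         # 将关键字移到末尾
--         reordered_words = [word for word in words if word not in keywords]
--         keywords_in_string = [word for word in words if word in keywords]
--         reordered_words.extend(keywords_in_string)
--         # 重新组合为字符串
--         return ' '.join(reordered_words)
-- ===== SOURCE B (Python) =====
-- KEYWORDS = {"pIC50", "IC50", "EC50", "TC50", "GI50", "Ki", "Kd", "Kb", "pKb"}
--
--
-- def _reorder(words, kws):
--     # recursion over the word list with an accumulator of keywords seen so far
--     # (collected in reverse, reversed once at the end)
--     if not words:
--         return list(reversed(kws))
--     w = words[0]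
--     if w in KEYWORDS:
--         return _reorder(words[1:], [w] + kws)
--     return [w] + _reorder(words[1:], kws)
--
--
-- def fuzzy_normalize(s):
--     if s.startswith("Unnamed"):
--         return ""
--     s = s.replace("µM", "").replace("µg/mL", "").replace("nM", "")
--     return ' '.join(_reorder(s.split(), []))
-- ===== Notes on version B (the rewrite author's own statement) =====
-- stated objective: alternative
-- what changed: A's two list comprehensions plus extend (three passes over the words) are replaced by one recursive pass with a keyword accumulator that emits non-keywords in place and appends the reversed accumulator at the end; unit stripping becomes chained replace calls.
import Mathlib
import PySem

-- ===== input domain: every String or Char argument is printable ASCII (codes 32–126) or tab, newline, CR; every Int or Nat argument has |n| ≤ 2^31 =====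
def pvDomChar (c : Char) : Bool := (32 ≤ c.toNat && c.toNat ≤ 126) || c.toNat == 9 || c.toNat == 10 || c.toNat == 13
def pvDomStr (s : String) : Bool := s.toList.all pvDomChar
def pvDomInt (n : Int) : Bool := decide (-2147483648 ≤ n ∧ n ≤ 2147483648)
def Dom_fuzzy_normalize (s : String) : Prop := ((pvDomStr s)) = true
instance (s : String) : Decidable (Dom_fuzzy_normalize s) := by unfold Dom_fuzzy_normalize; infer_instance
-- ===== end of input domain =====

-- B replaces A's two partitioning comprehensions + extend by a single recursive pass
-- over the words with a keyword accumulator (alternative decomposition, same cost).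


-- ===== PORT A =====
def pvKeywordsA : List String := ["pIC50", "IC50", "EC50", "TC50", "GI50", "Ki", "Kd", "Kb", "pKb"]

def fuzzy_normalize (s : String) : String :=
  if PySem.Str.startswith s "Unnamed" then ""
  else
    let s := ["µM", "µg/mL", "nM"].foldl (fun acc u => PySem.Str.replace acc u "") s
    let words := PySem.Str.split₀ s
    let reordered_words := words.filter (fun w => !pvKeywordsA.contains w)
    let keywords_in_string := words.filter (fun w => pvKeywordsA.contains w)
    PySem.Str.join " " (reordered_words ++ keywords_in_string)

-- ===== PORT B =====
def pvKEYWORDS : PySem.Set String :=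
  PySem.Set.ofList ["pIC50", "IC50", "EC50", "TC50", "GI50", "Ki", "Kd", "Kb", "pKb"]

def pvReorder : List String → List String → List String
  | [], kws => kws.reverse
  | w :: ws, kws =>
      if pvKEYWORDS.contains w then pvReorder ws (w :: kws)
      else w :: pvReorder ws kws

def fuzzy_normalize_alt (s : String) : String :=
  if PySem.Str.startswith s "Unnamed" then ""
  else
    let s := PySem.Str.replace (PySem.Str.replace (PySem.Str.replace s "µM" "") "µg/mL" "") "nM" ""
    PySem.Str.join " " (pvReorder (PySem.Str.split₀ s) [])

-- ===== PRECONDITION & SPEC =====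
def Spec_fuzzy_normalize (s : String) (out : String) : Prop := out = fuzzy_normalize_alt s
instance (s : String) (out : String) : Decidable (Spec_fuzzy_normalize s out) := by unfold Spec_fuzzy_normalize; infer_instance

-- ===== CLAIM (what is proved, stated in full; the proofs are below) =====
def Claim_equal_fuzzy_normalize : Prop := ∀ (s : String), Dom_fuzzy_normalize s → Spec_fuzzy_normalize s (fuzzy_normalize s)

-- ===== LEMMAS AND PROOFS =====

-- the recursive pass with accumulator computes A's partition
theorem pvReorder_eq (ws : List String) :
    ∀ kws, pvReorder ws kws
      = ws.filter (fun w => !pvKEYWORDS.contains w) ++ kws.reverse ++ ws.filter (fun w => pvKEYWORDS.contains w) := by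
  induction ws with
  | nil => intro kws; simp [pvReorder]
  | cons w ws ih =>
    intro kws
    by_cases h : w ∈ pvKEYWORDS <;>
      simp [pvReorder, h, ih]

-- the set literal of B is, as a list, A's keyword list
theorem pv_sets_eq : (pvKEYWORDS : List String) = pvKeywordsA := by decide

-- ===== VERDICT (by name: the statement is the Claim_ definition above) =====
theorem fuzzy_normalize_spec : Claim_equal_fuzzy_normalize := by
  intro s _
  unfold Spec_fuzzy_normalize fuzzy_normalize fuzzy_normalize_alt
  by_cases h : PySem.Str.startswith s "Unnamed" <;> simp only [h, if_true]
  simp [List.foldl, pvReorder_eq, pv_sets_eq]
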